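-- pv_equiv track=rewrite | github.com/BTCEnoch/gov | core/tap_protocol/tap_integration.py | _generate_utility_functions
-- ===== SOURCE A (Python) =====
-- from typing import Dict, List, Optional, Any, Tuple
--
-- def _generate_utility_functions(governor_data: Dict[str, Any]) -> List[str]:
--     """Generate utility functions based on governor properties"""
--     utilities = ["basic_divination", "knowledge_access"]
--
--     # Add tradition-specific utilities
--     traditions = governor_data.get("traditions", [])
--     for tradition in traditions:
--         if "enochian" in tradition.lower():
--             utilities.append("angelic_communication")
--         elif "tarot" in tradition.lower():
--             utilities.append("card_reading_enhancement")
--         elif "qabalah" in tradition.lower():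
--             utilities.append("tree_of_life_navigation")
--
--     return utilities
-- ===== SOURCE B (Python) =====
-- _UTILITY_TABLE = (
--     ("enochian", "angelic_communication"),
--     ("tarot", "card_reading_enhancement"),
--     ("qabalah", "tree_of_life_navigation"),
-- )
--
-- def _classify(t, table=_UTILITY_TABLE):
--     """First utility whose keyword occurs in t, found by recursion on the table; None if no keyword matches."""
--     if not table:
--         return None
--     keyword, utility = table[0]
--     return utility if keyword in t else _classify(t, table[1:])
--
-- def _generate_utility_functions(governor_data):
--     """Generate utility functions based on governor properties (map/filter pipeline, no accumulator loop)."""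
--     return ["basic_divination", "knowledge_access"] + [
--         u for u in (_classify(t.lower()) for t in governor_data.get("traditions", []))
--         if u is not None
--     ]
-- ===== Notes on version B (the rewrite author's own statement) =====
-- stated objective: idiomatic
-- what changed: Replaces A's accumulator loop with append inside an if/elif chain by a staged pipeline: a recursive first-match classifier over an ordered keyword table maps each tradition to Optional[utility], and the result is a fixed prefix concatenated with a filtered comprehension.
import Mathlib
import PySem

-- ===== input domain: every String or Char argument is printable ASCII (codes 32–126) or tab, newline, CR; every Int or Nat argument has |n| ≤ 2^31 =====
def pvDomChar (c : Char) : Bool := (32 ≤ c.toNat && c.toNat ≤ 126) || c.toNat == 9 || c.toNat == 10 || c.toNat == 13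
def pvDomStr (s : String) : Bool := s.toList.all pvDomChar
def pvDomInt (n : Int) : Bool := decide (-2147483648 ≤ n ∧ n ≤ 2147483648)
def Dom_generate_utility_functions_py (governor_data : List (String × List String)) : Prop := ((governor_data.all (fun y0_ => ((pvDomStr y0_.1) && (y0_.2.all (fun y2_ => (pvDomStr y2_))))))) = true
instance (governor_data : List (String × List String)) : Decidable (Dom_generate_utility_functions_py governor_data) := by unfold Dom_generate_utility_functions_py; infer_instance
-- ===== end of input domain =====

-- B rebuilds the list as a fixed prefix ++ filterMap of a recursive first-match classifier, instead of A's accumulator fold with an if/elif chain (idiomatic; same cost).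


-- ===== PORT A =====
def generate_utility_functions_py (governor_data : List (String × List String)) : List String :=
  (PySem.Dict.getD ⟨governor_data⟩ "traditions" []).foldl
    (fun utilities tradition =>
      if PySem.Str.isIn "enochian" (PySem.Str.lower tradition) then utilities ++ ["angelic_communication"]
      else if PySem.Str.isIn "tarot" (PySem.Str.lower tradition) then utilities ++ ["card_reading_enhancement"]
      else if PySem.Str.isIn "qabalah" (PySem.Str.lower tradition) then utilities ++ ["tree_of_life_navigation"]
      else utilities)
    ["basic_divination", "knowledge_access"]

-- ===== PORT B =====
def pvUtilityTable : List (String × String) :=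
  [("enochian", "angelic_communication"),
   ("tarot", "card_reading_enhancement"),
   ("qabalah", "tree_of_life_navigation")]

-- recursive first-match classifier (Source B's _classify)
def pvClassify (t : String) : List (String × String) → Option String
  | [] => none
  | (keyword, utility) :: rest =>
      if PySem.Str.isIn keyword t then some utility else pvClassify t rest

def generate_utility_functions_py_alt (governor_data : List (String × List String)) : List String :=
  ["basic_divination", "knowledge_access"] ++
    (PySem.Dict.getD ⟨governor_data⟩ "traditions" []).filterMap
      (fun tradition => pvClassify (PySem.Str.lower tradition) pvUtilityTable)

-- ===== PRECONDITION & SPEC =====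
def Spec_generate_utility_functions_py (governor_data : List (String × List String)) (out : List String) : Prop := out = generate_utility_functions_py_alt governor_data
instance (governor_data : List (String × List String)) (out : List String) : Decidable (Spec_generate_utility_functions_py governor_data out) := by unfold Spec_generate_utility_functions_py; infer_instance

-- ===== CLAIM (what is proved, stated in full; the proofs are below) =====
def Claim_equal_generate_utility_functions_py : Prop := ∀ (governor_data : List (String × List String)), Dom_generate_utility_functions_py governor_data → Spec_generate_utility_functions_py governor_data (generate_utility_functions_py governor_data)

-- ===== LEMMAS AND PROOFS =====
-- A's if/elif step appends exactly what the classifier yields on the ordered table.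
lemma pv_step_eq (u : List String) (t : String) :
    (if PySem.Str.isIn "enochian" (PySem.Str.lower t) then u ++ ["angelic_communication"]
     else if PySem.Str.isIn "tarot" (PySem.Str.lower t) then u ++ ["card_reading_enhancement"]
     else if PySem.Str.isIn "qabalah" (PySem.Str.lower t) then u ++ ["tree_of_life_navigation"]
     else u)
    = u ++ (pvClassify (PySem.Str.lower t) pvUtilityTable).toList := by
  simp only [pvUtilityTable, pvClassify]
  cases PySem.Str.isIn "enochian" (PySem.Str.lower t) <;>
    cases PySem.Str.isIn "tarot" (PySem.Str.lower t) <;>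
      cases PySem.Str.isIn "qabalah" (PySem.Str.lower t) <;> simp

-- A fold that appends the classifier's optional output equals prefix ++ filterMap.
lemma pv_fold_filterMap (f : String → Option String) :
    ∀ (l : List String) (init : List String),
      l.foldl (fun u t => u ++ (f t).toList) init = init ++ l.filterMap f := by
  intro l
  induction l with
  | nil => simp
  | cons h tl ih =>
      intro init
      simp only [List.foldl_cons, List.filterMap_cons, ih]
      cases f h <;> simp

-- ===== VERDICT (by name: the statement is the Claim_ definition above) =====
theorem generate_utility_functions_py_spec : Claim_equal_generate_utility_functions_py := by
  intro g _
  unfold Spec_generate_utility_functions_py generate_utility_functions_py generate_utility_functions_py_alt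
  have h : ∀ (u : List String) (t : String),
      (if PySem.Str.isIn "enochian" (PySem.Str.lower t) then u ++ ["angelic_communication"]
       else if PySem.Str.isIn "tarot" (PySem.Str.lower t) then u ++ ["card_reading_enhancement"]
       else if PySem.Str.isIn "qabalah" (PySem.Str.lower t) then u ++ ["tree_of_life_navigation"]
       else u)
      = u ++ (pvClassify (PySem.Str.lower t) pvUtilityTable).toList := pv_step_eq
  calc (PySem.Dict.getD ⟨g⟩ "traditions" []).foldl
        (fun utilities tradition =>
          if PySem.Str.isIn "enochian" (PySem.Str.lower tradition) then utilities ++ ["angelic_communication"]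
          else if PySem.Str.isIn "tarot" (PySem.Str.lower tradition) then utilities ++ ["card_reading_enhancement"]
          else if PySem.Str.isIn "qabalah" (PySem.Str.lower tradition) then utilities ++ ["tree_of_life_navigation"]
          else utilities)
        ["basic_divination", "knowledge_access"]
      = (PySem.Dict.getD ⟨g⟩ "traditions" []).foldl
          (fun u t => u ++ (pvClassify (PySem.Str.lower t) pvUtilityTable).toList)
          ["basic_divination", "knowledge_access"] := by
        congr 1; funext u t; exact h u t
    _ = ["basic_divination", "knowledge_access"] ++
          (PySem.Dict.getD ⟨g⟩ "traditions" []).filterMap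
            (fun t => pvClassify (PySem.Str.lower t) pvUtilityTable) :=
        pv_fold_filterMap _ _ _
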